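-- pv_equiv track=rewrite | github.com/poliomenta/TrafficToBIM | bim/traffic/tunnels.py | split_id_by_sharp_turns
-- ===== SOURCE A (Python) =====
-- def split_id_by_sharp_turns(sharp_turns, not_sharp_turns):
--     ids = sorted(list(set(sharp_turns + not_sharp_turns)))
--     sharp_turns_set = set(sharp_turns)
--     result = ''
--     for id in ids:
--         if id in sharp_turns_set:
--             if len(result) > 0 and result[-1] != '|':
--                 result += '|'
--         else:
--             result += str(id) + ','
--     groups = [x.split(',')[:-1] for x in result.split('|')]
--     biggest_group = sorted(groups, key=len, reverse=True)[0]
--     return list(map(int, biggest_group))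
-- ===== SOURCE B (Python) =====
-- def split_id_by_sharp_turns(sharp_turns, not_sharp_turns):
--     sharp = set(sharp_turns)
--     best = []
--     cur = []
--     for i in sorted(set(sharp_turns + not_sharp_turns)):
--         if i in sharp:
--             if len(cur) > len(best):
--                 best = cur
--             cur = []
--         else:
--             cur.append(i)
--     return cur if len(cur) > len(best) else best
-- ===== Notes on version B (the rewrite author's own statement) =====
-- stated objective: simpler
-- what changed: B replaces A's string round-trip (render ids into a ','/'|'-delimited string, re-split it into groups, stable-sort the groups by length and re-parse with int) by a single pass over the sorted distinct ids that maintains the current run and the best run directly as lists of ints, replacing best only on strictly greater length so the earliest longest run is kept exactly as A's stable sort does.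
import Mathlib
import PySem

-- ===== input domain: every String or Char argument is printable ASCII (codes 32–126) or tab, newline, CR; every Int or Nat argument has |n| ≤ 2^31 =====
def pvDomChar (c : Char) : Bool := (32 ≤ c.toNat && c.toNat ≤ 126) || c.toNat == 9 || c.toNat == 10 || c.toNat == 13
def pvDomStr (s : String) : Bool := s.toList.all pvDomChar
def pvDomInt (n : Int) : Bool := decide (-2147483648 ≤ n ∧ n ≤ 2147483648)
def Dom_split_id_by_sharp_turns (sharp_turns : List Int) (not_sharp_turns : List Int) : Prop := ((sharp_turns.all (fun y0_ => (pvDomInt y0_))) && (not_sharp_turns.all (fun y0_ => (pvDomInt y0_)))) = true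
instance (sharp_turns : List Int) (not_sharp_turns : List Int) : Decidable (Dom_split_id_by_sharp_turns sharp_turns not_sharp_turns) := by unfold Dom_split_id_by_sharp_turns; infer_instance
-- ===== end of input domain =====

-- B replaces A's string round-trip (render the sorted ids into a ','/'|'-delimited string, re-split
-- it, stable-sort the groups by length, re-parse with int) by one pass that keeps the current and
-- the best run directly as int lists; objective: simpler.

-- ===== PORT A =====
-- Python str values are modelled as List Char (the PySem.Chars level), as PYSEM.md prescribes.

-- int(x): ported by hand (PySem.Int.ofChars? exists, but its internals are private to PySemCore,
-- which blocks every proof about it on non-literal input). This hand port is exact on every string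
-- A ever passes to int(): the comma-separated pieces of result, which are always str(id) for an id
-- of the input list (an optional '-' followed by decimal digits; never empty, no whitespace).
def pvDigitsVal (ds : List Char) : Int :=
  ds.foldl (fun a c => a * 10 + ((c.toNat : Int) - 48)) 0

def pvInt (cs : List Char) : Int :=
  if cs.head? = some '-' then -(pvDigitsVal cs.tail) else pvDigitsVal cs

def split_id_by_sharp_turns (sharp_turns : List Int) (not_sharp_turns : List Int) : List Int :=
  -- ids = sorted(list(set(sharp_turns + not_sharp_turns)))
  let ids := PySem.List.sorted (PySem.Set.ofList (sharp_turns ++ not_sharp_turns)) (fun x => x) false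
  -- sharp_turns_set = set(sharp_turns)
  let sharp_turns_set : PySem.Set Int := PySem.Set.ofList sharp_turns
  -- result = ''; for id in ids: …
  let result : List Char := ids.foldl (fun res id =>
    if PySem.Set.contains sharp_turns_set id then
      (if 0 < res.length ∧ PySem.List.pyGet? res (-1) ≠ some '|' then res ++ ['|'] else res)
    else
      res ++ (PySem.Int.toChars id ++ [','])) []
  -- groups = [x.split(',')[:-1] for x in result.split('|')]
  let groups := (PySem.Chars.splitOn result ['|']).map
    (fun x => PySem.List.slice (PySem.Chars.splitOn x [',']) none (some (-1)))
  -- biggest_group = sorted(groups, key=len, reverse=True)[0]  ([0] can never raise: split returns ≥ 1 group)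
  let biggest_group := (PySem.List.pyGet? (PySem.List.sorted groups (fun g => g.length) true) 0).getD []
  -- return list(map(int, biggest_group))
  biggest_group.map pvInt

-- ===== PORT B =====
def split_id_by_sharp_turns_alt (sharp_turns : List Int) (not_sharp_turns : List Int) : List Int :=
  let sharp : PySem.Set Int := PySem.Set.ofList sharp_turns
  let st := (PySem.List.sorted (PySem.Set.ofList (sharp_turns ++ not_sharp_turns)) (fun x => x) false).foldl
    (fun (bc : List Int × List Int) i =>
      if PySem.Set.contains sharp i then
        (if bc.2.length > bc.1.length then (bc.2, ([] : List Int)) else (bc.1, ([] : List Int)))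
      else
        (bc.1, bc.2 ++ [i])) ([], [])
  if st.2.length > st.1.length then st.2 else st.1

-- ===== PRECONDITION & SPEC =====
def Spec_split_id_by_sharp_turns (sharp_turns : List Int) (not_sharp_turns : List Int) (out : List Int) : Prop := out = split_id_by_sharp_turns_alt sharp_turns not_sharp_turns
instance (sharp_turns : List Int) (not_sharp_turns : List Int) (out : List Int) : Decidable (Spec_split_id_by_sharp_turns sharp_turns not_sharp_turns out) := by unfold Spec_split_id_by_sharp_turns; infer_instance

-- ===== CLAIM (what is proved, stated in full; the proofs are below) =====
def Claim_equal_split_id_by_sharp_turns : Prop := ∀ (sharp_turns : List Int) (not_sharp_turns : List Int), Dom_split_id_by_sharp_turns sharp_turns not_sharp_turns → Spec_split_id_by_sharp_turns sharp_turns not_sharp_turns (split_id_by_sharp_turns sharp_turns not_sharp_turns)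

-- ===== LEMMAS AND PROOFS =====

-- ---- proof-side abstractions ----

-- one id rendered as "<id>,"
def pvRRone (x : Int) : List Char := PySem.Int.toChars x ++ [',']
-- a run rendered as "<a>,<b>,…,"
def pvRR (g : List Int) : List Char := (g.map pvRRone).flatten
-- the string state of A's loop: finished runs each followed by '|', then the current run
def pvRender (done : List (List Int)) (cur : List Int) : List Char :=
  (done.map (fun g => pvRR g ++ ['|'])).flatten ++ pvRR cur
-- A's loop body, abstracted over the sharp-membership test
def pvStepA (mem : Int → Bool) (res : List Char) (id : Int) : List Char :=
  if mem id then
    (if 0 < res.length ∧ PySem.List.pyGet? res (-1) ≠ some '|' then res ++ ['|'] else res)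
  else res ++ (PySem.Int.toChars id ++ [','])
-- B's loop body, abstracted the same way
def pvStepB (mem : Int → Bool) (bc : List Int × List Int) (i : Int) : List Int × List Int :=
  if mem i then
    (if bc.2.length > bc.1.length then (bc.2, ([] : List Int)) else (bc.1, ([] : List Int)))
  else (bc.1, bc.2 ++ [i])
-- the common abstract loop state: (finished runs, current run)
def pvRunsStep (mem : Int → Bool) (dc : List (List Int) × List Int) (i : Int) : List (List Int) × List Int :=
  if mem i then (if dc.2 ≠ [] then (dc.1 ++ [dc.2], []) else dc) else (dc.1, dc.2 ++ [i])
-- first run of maximal length (the strictly-greater fold B maintains)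
def pvBestOf (rs : List (List Int)) : List Int :=
  rs.foldl (fun b r => if r.length > b.length then r else b) []

-- ---- decimal digits: Nat.toDigits and the hand-ported int() ----

theorem pv_digitChar (m : Nat) (h : m < 10) :
    (Nat.digitChar m).isDigit = true ∧ ((Nat.digitChar m).toNat : Int) - 48 = m := by
  interval_cases m <;> exact ⟨by decide, by decide⟩

theorem pv_toDigitsCore_spec (fuel : Nat) :
    ∀ (n : Nat) (acc : List Char), n < fuel →
    ∃ ds, Nat.toDigitsCore 10 fuel n acc = ds ++ acc ∧ ds ≠ [] ∧
      (∀ c ∈ ds, c.isDigit = true) ∧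
      (∀ a : Int, ds.foldl (fun a c => a * 10 + ((c.toNat : Int) - 48)) a = a * 10 ^ ds.length + n) := by
  induction fuel with
  | zero => intro n acc h; omega
  | succ f ih =>
    intro n acc h
    rw [Nat.toDigitsCore]
    by_cases h0 : n / 10 = 0
    · refine ⟨[(n % 10).digitChar], by simp [h0], by simp, ?_, ?_⟩
      · intro c hc; simp at hc; subst hc; exact (pv_digitChar _ (Nat.mod_lt _ (by omega))).1
      · intro a
        have := (pv_digitChar (n % 10) (Nat.mod_lt _ (by omega))).2
        simp [List.foldl, this]
        omega
    · obtain ⟨ds, heq, hne, hdig, hval⟩ := ih (n / 10) ((n % 10).digitChar :: acc) (by omega)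
      refine ⟨ds ++ [(n % 10).digitChar], by simp [h0, heq], by simp, ?_, ?_⟩
      · intro c hc
        rcases List.mem_append.1 hc with h1 | h1
        · exact hdig c h1
        · simp at h1; subst h1; exact (pv_digitChar _ (Nat.mod_lt _ (by omega))).1
      · intro a
        rw [List.foldl_append, hval]
        have hd := (pv_digitChar (n % 10) (Nat.mod_lt _ (by omega))).2
        have hn : (n : Int) = 10 * ((n / 10 : Nat) : Int) + ((n % 10 : Nat) : Int) := by omega
        simp only [List.foldl, List.length_append, List.length_cons, List.length_nil, hd]
        rw [hn, pow_succ]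
        ring

theorem pv_toDigits_spec (m : Nat) :
    Nat.toDigits 10 m ≠ [] ∧ (∀ c ∈ Nat.toDigits 10 m, c.isDigit = true) ∧
      pvDigitsVal (Nat.toDigits 10 m) = m := by
  obtain ⟨ds, heq, hne, hdig, hval⟩ := pv_toDigitsCore_spec (m + 1) m [] (by omega)
  rw [Nat.toDigits, heq]
  simp only [List.append_nil]
  exact ⟨hne, hdig, by simpa [pvDigitsVal] using hval 0⟩

theorem pv_toChars_digits (n : Int) :
    ∀ c ∈ PySem.Int.toChars n, c.isDigit = true ∨ c = '-' := by
  intro c hc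
  rw [PySem.Int.toChars] at hc
  split at hc
  · rcases List.mem_cons.1 hc with h | h
    · right; exact h
    · left; exact (pv_toDigits_spec n.natAbs).2.1 c h
  · left; exact (pv_toDigits_spec n.toNat).2.1 c hc

theorem pv_bar_not_mem_toChars (n : Int) : '|' ∉ PySem.Int.toChars n := by
  intro h
  rcases pv_toChars_digits n _ h with h1 | h1 <;> simp at h1

theorem pv_comma_not_mem_toChars (n : Int) : ',' ∉ PySem.Int.toChars n := by
  intro h
  rcases pv_toChars_digits n _ h with h1 | h1 <;> simp at h1

theorem pv_pvInt_toChars (n : Int) : pvInt (PySem.Int.toChars n) = n := by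
  rw [PySem.Int.toChars]
  split
  · next hlt =>
    simp only [pvInt, List.head?_cons, List.tail_cons, if_true]
    rw [(pv_toDigits_spec n.natAbs).2.2]
    omega
  · next hge =>
    obtain ⟨hne, hdig, hval⟩ := pv_toDigits_spec n.toNat
    obtain ⟨c, t, hct⟩ := List.exists_cons_of_ne_nil hne
    rw [pvInt, hct]
    have hcd : c.isDigit = true := by rw [hct] at hdig; exact hdig c (by simp)
    have hcne : ¬ (List.head? (c :: t) = some '-') := by
      simp only [List.head?_cons, Option.some.injEq]
      intro h; rw [h] at hcd; simp at hcd
    rw [if_neg hcne, ← hct, hval]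
    omega

-- ---- split('|') / split(',') : PySem.Chars.splitOn with a one-char separator is List.splitOn ----

theorem pv_modifyHead_triv {α : Type} (l : List α) : List.modifyHead (fun h => h) l = l := by
  cases l <;> rfl

theorem pv_go_singleton (c : Char) (fuel : Nat) :
    ∀ (l cur : List Char) (acc : List (List Char)), l.length < fuel →
      PySem.Chars.splitOn.go [c] fuel l cur acc
        = acc.reverse ++ (List.splitOn c l).modifyHead (fun h => cur.reverse ++ h) := by
  induction fuel with
  | zero => intro l cur acc h; omega
  | succ f ih =>
    intro l cur acc h
    cases l with
    | nil =>
      rw [PySem.Chars.splitOn.go]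
      · simp [List.splitOn, List.splitOnP, List.splitOnP.go]
      · omega
    | cons ch rest =>
      rw [PySem.Chars.splitOn.go]
      by_cases hc : ch = c
      · subst hc
        have hpre : List.isPrefixOf [ch] (ch :: rest) = true := by simp [List.isPrefixOf]
        rw [if_pos hpre]
        simp only [List.length_cons] at h
        rw [ih _ _ _ (by simp; omega)]
        simp only [List.splitOn]
        rw [List.splitOnP_cons, if_pos (by simp)]
        simp only [List.reverse_nil, List.nil_append]
        rw [pv_modifyHead_triv]
        simp
      · have hpre : List.isPrefixOf [c] (ch :: rest) = false := by
          simp [List.isPrefixOf]; exact fun hh => absurd hh.symm hc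
        rw [if_neg (by simp [hpre])]
        simp only [List.length_cons] at h
        rw [ih _ _ _ (by omega)]
        simp only [List.splitOn]
        rw [List.splitOnP_cons, if_neg (by simp [hc])]
        rw [List.modifyHead_modifyHead]
        have : ((fun h => cur.reverse ++ h) ∘ List.cons ch) = fun h => cur.reverse ++ ch :: h := by
          funext h'; simp
        rw [this]
        simp

theorem pv_splitOn_singleton (s : List Char) (c : Char) :
    PySem.Chars.splitOn s [c] = s.splitOn c := by
  rw [PySem.Chars.splitOn, pv_go_singleton c (s.length + 1) s [] [] (by omega)]
  simp only [List.reverse_nil, List.nil_append]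
  rw [pv_modifyHead_triv]

-- ---- structure of the rendered string ----

theorem pv_intercalate_cons (sep x : List Char) (l : List (List Char)) (h : l ≠ []) :
    List.intercalate sep (x :: l) = x ++ sep ++ List.intercalate sep l := by
  obtain ⟨y, t, rfl⟩ := List.exists_cons_of_ne_nil h
  simp [List.intercalate, List.intersperse]

theorem pv_rr_intercalate (g : List Int) :
    pvRR g = [','].intercalate (g.map PySem.Int.toChars ++ [[]]) := by
  induction g with
  | nil => simp [pvRR, List.intercalate]
  | cons a g ih =>
    rw [pvRR, List.map_cons, List.flatten_cons, ← pvRR, ih]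
    rw [List.map_cons, List.cons_append, pv_intercalate_cons _ _ _ (by simp)]
    simp [pvRRone]

theorem pv_render_intercalate (done : List (List Int)) (cur : List Int) :
    pvRender done cur = ['|'].intercalate ((done ++ [cur]).map pvRR) := by
  induction done with
  | nil => simp [pvRender, List.intercalate]
  | cons g done ih =>
    rw [pvRender, List.map_cons, List.flatten_cons, List.append_assoc, ← pvRender, ih]
    rw [List.cons_append, List.map_cons, pv_intercalate_cons _ _ _ (by simp)]

theorem pv_bar_not_mem_rr (g : List Int) : '|' ∉ pvRR g := by
  intro h
  rw [pvRR, List.mem_flatten] at h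
  obtain ⟨l, hl, hmem⟩ := h
  obtain ⟨x, _, rfl⟩ := List.mem_map.1 hl
  rw [pvRRone, List.mem_append] at hmem
  rcases hmem with h1 | h1
  · exact pv_bar_not_mem_toChars x h1
  · simp at h1

-- parsing the rendered string recovers the runs (as strings)
theorem pv_groups_of_render (done : List (List Int)) (cur : List Int) :
    (PySem.Chars.splitOn (pvRender done cur) ['|']).map
        (fun x => PySem.List.slice (PySem.Chars.splitOn x [',']) none (some (-1)))
      = (done ++ [cur]).map (fun g => g.map PySem.Int.toChars) := by
  rw [pv_splitOn_singleton, pv_render_intercalate]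
  rw [List.splitOn_intercalate _ _ (by
        intro l hl
        obtain ⟨g, _, rfl⟩ := List.mem_map.1 hl
        exact pv_bar_not_mem_rr g) (by simp)]
  rw [List.map_map]
  apply List.map_congr_left
  intro g _
  show PySem.List.slice (PySem.Chars.splitOn (pvRR g) [',']) none (some (-1)) = g.map PySem.Int.toChars
  rw [pv_splitOn_singleton, pv_rr_intercalate]
  rw [List.splitOn_intercalate _ _ (by
        intro l hl
        rcases List.mem_append.1 hl with h1 | h1
        · obtain ⟨x, _, rfl⟩ := List.mem_map.1 h1
          exact pv_comma_not_mem_toChars x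
        · simp at h1; subst h1; simp) (by simp)]
  rw [PySem.List.slice_to_neg_one, List.dropLast_concat]

-- ---- the two loop invariants ----

theorem pv_pyGet_last {α : Type} (xs : List α) (a : α) :
    PySem.List.pyGet? (xs ++ [a]) (-1) = some a := by
  simp [PySem.List.pyGet?, PySem.List.pyIdx?]

theorem pv_pyGet_zero {α : Type} (xs : List α) : PySem.List.pyGet? xs 0 = xs.head? := by
  cases xs <;> simp [PySem.List.pyGet?, PySem.List.pyIdx?]

theorem pv_rr_concat (g : List Int) (x : Int) :
    pvRR (g ++ [x]) = pvRR g ++ (PySem.Int.toChars x ++ [',']) := by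
  simp [pvRR, pvRRone]

theorem pv_stepA_render (mem : Int → Bool) (done : List (List Int)) (cur : List Int) (i : Int) :
    pvStepA mem (pvRender done cur) i
      = pvRender (pvRunsStep mem (done, cur) i).1 (pvRunsStep mem (done, cur) i).2 := by
  cases hmem : mem i with
  | false =>
    simp only [pvStepA, pvRunsStep, hmem, Bool.false_eq_true, if_false]
    rw [pvRender, pvRender, pv_rr_concat, ← List.append_assoc]
    simp [List.append_assoc]
  | true =>
    simp only [pvStepA, pvRunsStep, hmem, if_true]
    rcases List.eq_nil_or_concat cur with rfl | ⟨c', x, rfl⟩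
    · rw [if_neg, if_neg (by simp)]
      rcases List.eq_nil_or_concat done with rfl | ⟨d', g, rfl⟩
      · simp [pvRender, pvRR]
      · simp only [List.concat_eq_append]
        intro ⟨h1, h2⟩
        apply h2
        show PySem.List.pyGet? (pvRender (d' ++ [g]) []) (-1) = some '|'
        rw [pvRender]
        simp only [List.map_append, List.flatten_append, List.map_cons, List.map_nil,
          List.flatten_cons, List.flatten_nil, pvRR, List.append_nil]
        rw [← List.append_assoc]
        exact pv_pyGet_last _ '|'
    · simp only [List.concat_eq_append]
      rw [if_pos, if_pos (by simp)]
      · show pvRender done (c' ++ [x]) ++ ['|'] = pvRender (done ++ [c' ++ [x]]) []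
        rw [pvRender, pvRender, pv_rr_concat]
        simp [List.map_append, List.flatten_append, pvRR, pvRRone]
      · constructor
        · rw [pvRender, pv_rr_concat]
          simp
        · rw [pvRender, pv_rr_concat]
          rw [← List.append_assoc, ← List.append_assoc]
          rw [pv_pyGet_last]
          simp

theorem pv_foldA (mem : Int → Bool) (ids : List Int) :
    ∀ done cur, ids.foldl (pvStepA mem) (pvRender done cur)
      = pvRender (ids.foldl (pvRunsStep mem) (done, cur)).1 (ids.foldl (pvRunsStep mem) (done, cur)).2 := by
  induction ids with
  | nil => intro done cur; rfl
  | cons i ids ih =>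
    intro done cur
    rw [List.foldl_cons, List.foldl_cons, pv_stepA_render]
    exact ih _ _

theorem pv_stepB_best (mem : Int → Bool) (done : List (List Int)) (cur : List Int) (i : Int) :
    pvStepB mem (pvBestOf done, cur) i
      = (pvBestOf (pvRunsStep mem (done, cur) i).1, (pvRunsStep mem (done, cur) i).2) := by
  cases hmem : mem i with
  | false => simp [pvStepB, pvRunsStep, hmem]
  | true =>
    rcases cur with _ | ⟨c, t⟩
    · simp [pvStepB, pvRunsStep, hmem]
    · simp only [pvStepB, pvRunsStep, hmem, if_true]
      rw [if_pos (by simp : ¬(c :: t = []))]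
      have hb : pvBestOf (done ++ [c :: t])
          = if (c :: t).length > (pvBestOf done).length then c :: t else pvBestOf done := by
        rw [pvBestOf, List.foldl_append]
        rfl
      by_cases hlen : (c :: t).length > (pvBestOf done).length
      · simp only [hb, if_pos hlen]
      · simp only [hb, if_neg hlen]

theorem pv_foldB (mem : Int → Bool) (ids : List Int) :
    ∀ done cur, ids.foldl (pvStepB mem) (pvBestOf done, cur)
      = (pvBestOf (ids.foldl (pvRunsStep mem) (done, cur)).1, (ids.foldl (pvRunsStep mem) (done, cur)).2) := by
  induction ids with
  | nil => intro done cur; rfl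
  | cons i ids ih =>
    intro done cur
    rw [List.foldl_cons, List.foldl_cons, pv_stepB_best]
    have := ih (pvRunsStep mem (done, cur) i).1 (pvRunsStep mem (done, cur) i).2
    simpa using this

-- ---- head of the stable descending sort = the strictly-greater fold ----

theorem pv_insertBy_step {α : Type} (x : List α) (acc : List (List α)) :
    ((PySem.List.insertBy (fun a b => decide (b.length < a.length)) x acc).head?.getD [])
      = (if x.length > (acc.head?.getD []).length then x else acc.head?.getD []) := by
  cases acc with
  | nil =>
    simp only [PySem.List.insertBy, List.head?_cons, Option.getD_some, List.head?_nil,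
      Option.getD_none, List.length_nil]
    cases x <;> simp
  | cons y ys =>
    show ((if decide (y.length < x.length) = true then x :: y :: ys
        else y :: PySem.List.insertBy _ x ys).head?.getD []) = _
    by_cases h : y.length < x.length
    · rw [if_pos (by simpa using h), if_pos (by simpa using h)]
      simp
    · rw [if_neg (by simpa using h), if_neg (by simpa using h)]
      simp

theorem pv_fold_insert {α : Type} (rs : List (List α)) :
    ∀ acc, (((rs.foldl (fun acc x => PySem.List.insertBy (fun a b => decide (b.length < a.length)) x acc) acc).head?).getD [])
      = rs.foldl (fun b r => if r.length > b.length then r else b) (acc.head?.getD []) := by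
  induction rs with
  | nil => intro acc; rfl
  | cons x rs ih =>
    intro acc
    rw [List.foldl_cons, List.foldl_cons, ih, pv_insertBy_step]

theorem pv_sorted_head {α : Type} (rs : List (List α)) :
    ((PySem.List.sorted rs (fun g => g.length) true).head?.getD [])
      = rs.foldl (fun b r => if r.length > b.length then r else b) [] := by
  rw [PySem.List.sorted_rev_eq_foldl_insertBy, pv_fold_insert]
  rfl

theorem pv_bestOf_map_aux (rs : List (List Int)) :
    ∀ b, (rs.map (fun g => g.map PySem.Int.toChars)).foldl
        (fun b r => if r.length > b.length then r else b) (b.map PySem.Int.toChars)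
      = (rs.foldl (fun b r => if r.length > b.length then r else b) b).map PySem.Int.toChars := by
  induction rs with
  | nil => intro b; rfl
  | cons r rs ih =>
    intro b
    rw [List.map_cons, List.foldl_cons, List.foldl_cons]
    simp only [List.length_map]
    by_cases h : r.length > b.length
    · rw [if_pos h, if_pos h, ih]
    · rw [if_neg h, if_neg h, ih]

theorem pv_bestOf_map (rs : List (List Int)) :
    (rs.map (fun g => g.map PySem.Int.toChars)).foldl
        (fun b r => if r.length > b.length then r else b) []
      = (pvBestOf rs).map PySem.Int.toChars := by
  have := pv_bestOf_map_aux rs []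
  simpa [pvBestOf] using this

-- ===== VERDICT (by name: the statement is the Claim_ definition above) =====
theorem split_id_by_sharp_turns_spec : Claim_equal_split_id_by_sharp_turns := by
  intro s ns _
  unfold Spec_split_id_by_sharp_turns split_id_by_sharp_turns split_id_by_sharp_turns_alt
  simp only []
  rw [show (fun (res : List Char) (id : Int) =>
      if PySem.Set.contains (PySem.Set.ofList s) id then
        (if 0 < res.length ∧ PySem.List.pyGet? res (-1) ≠ some '|' then res ++ ['|'] else res)
      else res ++ (PySem.Int.toChars id ++ [',']))
    = pvStepA (PySem.Set.contains (PySem.Set.ofList s)) from rfl]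
  rw [show (fun (bc : List Int × List Int) (i : Int) =>
      if PySem.Set.contains (PySem.Set.ofList s) i then
        (if bc.2.length > bc.1.length then (bc.2, ([] : List Int)) else (bc.1, ([] : List Int)))
      else (bc.1, bc.2 ++ [i]))
    = pvStepB (PySem.Set.contains (PySem.Set.ofList s)) from rfl]
  have hA0 := pv_foldA (PySem.Set.contains (PySem.Set.ofList s))
    (PySem.List.sorted (PySem.Set.ofList (s ++ ns)) (fun x => x) false) [] []
  rw [show pvRender [] [] = ([] : List Char) from rfl] at hA0
  have hB0 := pv_foldB (PySem.Set.contains (PySem.Set.ofList s))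
    (PySem.List.sorted (PySem.Set.ofList (s ++ ns)) (fun x => x) false) [] []
  rw [show pvBestOf [] = ([] : List Int) from rfl] at hB0
  rw [hA0, hB0, pv_groups_of_render, pv_pyGet_zero]
  simp only [pv_sorted_head, pv_bestOf_map]
  rw [List.map_map]
  simp only [Function.comp_def]
  rw [List.map_congr_left (g := fun x => x) (fun x _ => pv_pvInt_toChars x)]
  rw [show (List.map (fun x => x) (pvBestOf ((List.foldl (pvRunsStep (PySem.Set.contains (PySem.Set.ofList s))) ([], []) (PySem.List.sorted (PySem.Set.ofList (s ++ ns)) (fun x => x) false)).1 ++ [(List.foldl (pvRunsStep (PySem.Set.contains (PySem.Set.ofList s))) ([], []) (PySem.List.sorted (PySem.Set.ofList (s ++ ns)) (fun x => x) false)).2])))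
    = pvBestOf ((List.foldl (pvRunsStep (PySem.Set.contains (PySem.Set.ofList s))) ([], []) (PySem.List.sorted (PySem.Set.ofList (s ++ ns)) (fun x => x) false)).1 ++ [(List.foldl (pvRunsStep (PySem.Set.contains (PySem.Set.ofList s))) ([], []) (PySem.List.sorted (PySem.Set.ofList (s ++ ns)) (fun x => x) false)).2]) from List.map_id' _]
  rw [pvBestOf, List.foldl_append]
  rfl
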